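-- pv_equiv track=rewrite | github.com/vibhor-5/thought-anchors | utils.py | split_solution_into_chunks
-- ===== SOURCE A (Python) =====
-- from typing import List, Tuple, Optional, Dict
--
-- def split_solution_into_chunks(solution_text: str) -> List[str]:
--     """
--     Split a solution into chunks for rollout generation.
--
--     Args:
--         solution_text: The full solution text
--
--     Returns:
--         List of chunks
--     """
--     # First, remove the prompt part if present
--     if "<think>" in solution_text:
--         solution_text = solution_text.split("<think>")[1].strip()
--
--     # Remove the closing tag if present
--     if "</think>" in solution_text:
--         solution_text = solution_text.split("</think>")[0].strip()
--
--     # Define patterns for chunk boundaries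
--     sentence_ending_tokens = [".", "?", "!"]
--     paragraph_ending_patterns = ["\n\n", "\r\n\r\n"]
--
--     # Split the text into chunks
--     chunks = []
--     current_chunk = ""
--
--     # Process the text character by character
--     i = 0
--     while i < len(solution_text):
--         current_chunk += solution_text[i]
--
--         # Check for paragraph endings
--         is_paragraph_end = False
--         for pattern in paragraph_ending_patterns:
--             if (
--                 i + len(pattern) <= len(solution_text)
--                 and solution_text[i : i + len(pattern)] == pattern
--             ):
--                 is_paragraph_end = True
--                 break
--
--         # Check for sentence endings followed by space or newline
--         is_sentence_end = False
--         if i < len(solution_text) - 1 and solution_text[i] in sentence_ending_tokens: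
--             next_char = solution_text[i + 1]
--             if next_char == " " or next_char == "\n":
--                 is_sentence_end = True
--
--         # If we found a boundary, add the chunk and reset
--         if is_paragraph_end or is_sentence_end:
--             if current_chunk.strip():
--                 chunks.append(current_chunk.strip())
--                 current_chunk = ""
--
--         i += 1
--
--     # # Add the last chunk if not empty
--     # if current_chunk.strip():
--     #     chunks.append(current_chunk.strip())
--     #     chunk_idxs.append(len(solution_text) - 1)  # Add last index
--
--     # Merge small chunks (less than 10 characters)
--     i = 0
--     while i < len(chunks):
--         if len(chunks[i]) < 10:
--             # If this is the last chunk, merge with previous chunk if possible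
--             if i == len(chunks) - 1:
--                 if i > 0:
--                     chunks[i - 1] = chunks[i - 1] + " " + chunks[i]
--                     chunks.pop(i)
--             # Otherwise merge with the next chunk
--             else:
--                 chunks[i + 1] = chunks[i] + " " + chunks[i + 1]
--                 chunks.pop(i)
--                 # Don't increment i since we need to check the new merged chunk
--             # If we're at the beginning and there's only one chunk, just keep it
--             if i == 0 and len(chunks) == 1:
--                 break
--         else:
--             i += 1
--
--     # chunk_boundaries = [(chunk_idxs[i], chunk_idxs[i + 1]) for i in range(len(chunk_idxs) - 1)]
--     # chunk_boundaries.append((chunk_idxs[-1], len(solution_text)))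
--
--     # if get_idxs:
--     #     return chunks, chunk_boundaries
--     # else:
--     return chunks
-- ===== SOURCE B (Python) =====
-- from typing import List
--
--
-- def _next_boundary(t: str):
--     """Index of the first chunk boundary in t, or None."""
--     for i, ch in enumerate(t):
--         if ch == "\n" and t[i + 1:i + 2] == "\n":
--             return i
--         if ch == "\r" and t[i + 1:i + 4] == "\n\r\n":
--             return i
--         if ch in ".?!" and t[i + 1:i + 2] in (" ", "\n"):
--             return i
--     return None
--
--
-- def split_solution_into_chunks(solution_text: str) -> List[str]:
--     # First, remove the prompt part if present
--     if "<think>" in solution_text: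
--         solution_text = solution_text.split("<think>")[1].strip()
--
--     # Remove the closing tag if present
--     if "</think>" in solution_text:
--         solution_text = solution_text.split("</think>")[0].strip()
--
--     # Cut the text at each boundary: every chunk ends at (and includes) its
--     # boundary character; text after the last boundary is discarded.
--     chunks = []
--     t = solution_text
--     while True:
--         k = _next_boundary(t)
--         if k is None:
--             break
--         piece = t[:k + 1].strip()
--         if piece:
--             chunks.append(piece)
--         t = t[k + 1:]
--
--     # Greedy merge of small chunks (< 10 chars) as a single forward pass with
--     # a pending buffer; a trailing pending buffer merges into the last chunk.
--     merged = []
--     pending = ""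
--     for c in chunks:
--         cur = (pending + " " + c) if pending else c
--         if len(cur) >= 10:
--             merged.append(cur)
--             pending = ""
--         else:
--             pending = cur
--     if pending:
--         if merged:
--             merged[-1] = merged[-1] + " " + pending
--         else:
--             merged = [pending]
--     return merged
-- ===== Notes on version B (the rewrite author's own statement) =====
-- stated objective: faster
-- what changed: Replaces the character-accumulating scan by a find-next-boundary-then-slice loop and the in-place index/pop merge loop by a single forward fold with a pending buffer (the <think>/</think> stripping is kept verbatim).
import Mathlib
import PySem

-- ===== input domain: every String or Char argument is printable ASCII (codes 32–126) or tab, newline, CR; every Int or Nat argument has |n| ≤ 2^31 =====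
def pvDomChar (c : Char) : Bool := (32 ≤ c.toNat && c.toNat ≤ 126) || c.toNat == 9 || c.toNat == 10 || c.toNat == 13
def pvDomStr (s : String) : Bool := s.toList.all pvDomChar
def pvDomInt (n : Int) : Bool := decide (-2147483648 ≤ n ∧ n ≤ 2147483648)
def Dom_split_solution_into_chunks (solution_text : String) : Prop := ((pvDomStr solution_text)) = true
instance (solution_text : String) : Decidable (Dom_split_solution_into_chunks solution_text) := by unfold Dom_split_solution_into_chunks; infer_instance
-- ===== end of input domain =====

-- B (measurably faster: slicing instead of per-char string concatenation, one merge pass instead of pop): chunks are cut by finding the next boundary and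
-- slicing (instead of A's character-accumulating scan), and small chunks are merged by one forward
-- fold with a pending buffer (instead of A's in-place index/pop loop). Both Pythons share the
-- <think>/</think> preprocessing verbatim, so both ports use the helper pvPreprocess.

def pvThink : List Char := ['<', 't', 'h', 'i', 'n', 'k', '>']
def pvEndThink : List Char := ['<', '/', 't', 'h', 'i', 'n', 'k', '>']

-- the two preprocessing `if`s, shared verbatim by A and B.  `parts[1]` / `parts[0]` cannot raise
-- under the guarding `in` checks, so pyGetD with default [] is exact.
def pvPreprocess (cs : List Char) : List Char :=
  let cs1 := if PySem.Chars.isIn pvThink cs then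
      PySem.Chars.strip (PySem.List.pyGetD (PySem.Chars.splitOn cs pvThink) 1 [])
    else cs
  if PySem.Chars.isIn pvEndThink cs1 then
    PySem.Chars.strip (PySem.List.pyGetD (PySem.Chars.splitOn cs1 pvEndThink) 0 [])
  else cs1

-- ===== PORT A =====
-- A's per-position boundary test at position i, where c = s[i] and rest = s[i+1:].
-- `i + len(p) <= n and s[i:i+len(p)] == p` is exactly `(c :: rest).take |p| = p`;
-- `i < n - 1` is exactly `rest.head? = some next`.
def pvBoundA (c : Char) (rest : List Char) : Bool :=
  let isPara := ((c :: rest).take 2 == ['\n', '\n']) || ((c :: rest).take 4 == ['\r', '\n', '\r', '\n'])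
  let isSent :=
    match rest.head? with
    | some next => (c == '.' || c == '?' || c == '!') && (next == ' ' || next == '\n')
    | none => false
  isPara || isSent

-- A's while loop over i with the growing current_chunk: ported as structural recursion on the
-- remaining text with the accumulated current chunk (acc).  When the boundary fires but the
-- stripped chunk is empty, current_chunk is NOT reset (as in A).
def pvScanA : List Char → List Char → List (List Char)
  | _, [] => []
  | acc, c :: rest =>
    let acc' := acc ++ [c]
    if pvBoundA c rest then
      if (PySem.Chars.strip acc').isEmpty then pvScanA acc' rest
      else PySem.Chars.strip acc' :: pvScanA [] rest
    else pvScanA acc' rest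

-- A's in-place merge loop (index i, pop) ported as a zipper: done = chunks[:i] reversed, todo = chunks[i:].
def pvMergeA : List (List Char) → List (List Char) → List (List Char)
  | done, [] => done.reverse
  | done, [c] =>
    if c.length < 10 then
      match done with
      | [] => [c]                                   -- i == 0 and len(chunks) == 1: keep it
      | p :: ds => ((p ++ ' ' :: c) :: ds).reverse  -- last chunk merges into the previous one
    else (c :: done).reverse
  | done, c :: next :: rest =>
    if c.length < 10 then pvMergeA done ((c ++ ' ' :: next) :: rest)
    else pvMergeA (c :: done) (next :: rest)
termination_by _ todo => todo.length

def split_solution_into_chunks (solution_text : String) : List String :=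
  let t := pvPreprocess solution_text.toList
  (pvMergeA [] (pvScanA [] t)).map String.ofList

-- ===== PORT B =====
-- Source B's _next_boundary: index of the first boundary, scanning left to right.
def pvBoundB (c : Char) (rest : List Char) : Bool :=
  (c == '\n' && rest.take 1 == ['\n']) ||
  (c == '\r' && rest.take 3 == ['\n', '\r', '\n']) ||
  ((c == '.' || c == '?' || c == '!') && (rest.take 1 == [' '] || rest.take 1 == ['\n']))

def pvNextBoundary : List Char → Option Nat
  | [] => none
  | c :: rest => if pvBoundB c rest then some 0 else (pvNextBoundary rest).map (· + 1)

theorem pvNextBoundary_lt {t : List Char} {k : Nat} (h : pvNextBoundary t = some k) :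
    k < t.length := by
  induction t generalizing k with
  | nil => simp [pvNextBoundary] at h
  | cons c rest ih =>
    simp only [pvNextBoundary] at h
    split at h
    · cases h; simp
    · rcases Option.map_eq_some_iff.mp h with ⟨j, hj, rfl⟩
      have := ih hj; simp; omega

-- Source B's while loop: cut off the stripped prefix through the boundary, recurse on the rest.
def pvChunkifyB (t : List Char) : List (List Char) :=
  match h : pvNextBoundary t with
  | none => []
  | some k =>
    let pre := PySem.Chars.strip (t.take (k + 1))
    (if pre.isEmpty then [] else [pre]) ++ pvChunkifyB (t.drop (k + 1))
termination_by t.length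
decreasing_by
  have := pvNextBoundary_lt h
  simp [List.length_drop]; omega

-- Source B's forward merge fold with the pending buffer, then the final pending flush
-- (`merged[-1] = merged[-1] + " " + pending` ported via reverse; exact).
def pvMergeB (chunks : List (List Char)) : List (List Char) :=
  let st := chunks.foldl
    (fun (st : List (List Char) × List Char) c =>
      let cur := if st.2.isEmpty then c else st.2 ++ ' ' :: c
      if 10 ≤ cur.length then (st.1 ++ [cur], []) else (st.1, cur))
    ([], [])
  if st.2.isEmpty then st.1
  else
    match st.1.reverse with
    | [] => [st.2]
    | last :: revInit => ((last ++ ' ' :: st.2) :: revInit).reverse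

def split_solution_into_chunks_alt (solution_text : String) : List String :=
  let t := pvPreprocess solution_text.toList
  (pvMergeB (pvChunkifyB t)).map String.ofList

-- ===== PRECONDITION & SPEC =====
def Spec_split_solution_into_chunks (solution_text : String) (out : List String) : Prop := out = split_solution_into_chunks_alt solution_text
instance (solution_text : String) (out : List String) : Decidable (Spec_split_solution_into_chunks solution_text out) := by unfold Spec_split_solution_into_chunks; infer_instance

-- ===== CLAIM (what is proved, stated in full; the proofs are below) =====
def Claim_equal_split_solution_into_chunks : Prop := ∀ (solution_text : String), Dom_split_solution_into_chunks solution_text → Spec_split_solution_into_chunks solution_text (split_solution_into_chunks solution_text)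

-- ===== LEMMAS AND PROOFS =====

-- the two boundary tests agree
theorem pvBound_eq (c : Char) (rest : List Char) : pvBoundA c rest = pvBoundB c rest := by
  cases rest with
  | nil => simp [pvBoundA, pvBoundB]
  | cons n rs =>
    simp only [pvBoundA, pvBoundB, List.take_succ_cons, List.head?_cons, List.cons_beq_cons,
      List.take_zero]
    cases h3 : (n == '\n') <;> cases h4 : (n == ' ') <;>
      simp [Bool.or_comm, Bool.and_comm]

-- a chunk whose strip is empty is all whitespace …
theorem pvStrip_nil_all {cs : List Char} (h : PySem.Chars.strip cs = []) :
    ∀ c ∈ cs, PySem.Chars.isspace c = true := by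
  intro c hc
  unfold PySem.Chars.strip PySem.Chars.rstrip PySem.Chars.lstrip at h
  have h2 : List.dropWhile PySem.Chars.isspace ((List.dropWhile PySem.Chars.isspace cs).reverse) = [] := by
    simpa using h
  rw [List.dropWhile_eq_nil_iff] at h2
  by_cases hsp : PySem.Chars.isspace c = true
  · exact hsp
  · exfalso
    have hmem : c ∈ List.dropWhile PySem.Chars.isspace cs := by
      have htd := List.takeWhile_append_dropWhile (p := PySem.Chars.isspace) (l := cs)
      rw [← htd] at hc
      rcases List.mem_append.mp hc with h' | h'
      · exact (hsp (List.mem_takeWhile_imp h')).elim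
      · exact h'
    exact hsp (h2 c (List.mem_reverse.mpr hmem))

-- … and strip skips such a prefix
theorem pvStrip_append_of_nil {cs : List Char} (h : PySem.Chars.strip cs = [])
    (x : List Char) : PySem.Chars.strip (cs ++ x) = PySem.Chars.strip x := by
  have hall : ∀ c ∈ cs, PySem.Chars.isspace c = true := pvStrip_nil_all h
  unfold PySem.Chars.strip PySem.Chars.lstrip
  congr 1
  rw [List.dropWhile_append]
  simp [List.dropWhile_eq_nil_iff.mpr hall]

theorem pvChunkifyB_none {t : List Char} (h : pvNextBoundary t = none) :
    pvChunkifyB t = [] := by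
  rw [pvChunkifyB]; split <;> simp_all

theorem pvChunkifyB_some {t : List Char} {k : Nat} (h : pvNextBoundary t = some k) :
    pvChunkifyB t =
      (if PySem.Chars.strip (t.take (k + 1)) = [] then []
       else [PySem.Chars.strip (t.take (k + 1))]) ++ pvChunkifyB (t.drop (k + 1)) := by
  rw [pvChunkifyB]; split <;> simp_all [List.isEmpty_iff]

-- phase 1: A's scan with accumulated chunk acc equals B's cut-at-next-boundary loop
theorem pvScan_eq (t : List Char) : ∀ acc, pvScanA acc t =
      match pvNextBoundary t with
      | none => []
      | some k =>
        (if PySem.Chars.strip (acc ++ t.take (k + 1)) = [] then []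
         else [PySem.Chars.strip (acc ++ t.take (k + 1))]) ++ pvChunkifyB (t.drop (k + 1)) := by
  induction t with
  | nil => intro acc; simp [pvScanA, pvNextBoundary]
  | cons c rest ih =>
    intro acc
    by_cases hb : pvBoundB c rest = true
    · have hnbc : pvNextBoundary (c :: rest) = some 0 := by simp [pvNextBoundary, hb]
      rw [hnbc]
      simp only [List.take_succ_cons, List.take_zero, List.drop_succ_cons, List.drop_zero]
      by_cases hs : PySem.Chars.strip (acc ++ [c]) = []
      · have hLHS : pvScanA acc (c :: rest) = pvScanA (acc ++ [c]) rest := by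
          simp [pvScanA, pvBound_eq, hb, hs]
        rw [hLHS, ih, if_pos hs]
        simp only [List.nil_append]
        cases hnb : pvNextBoundary rest with
        | none => rw [pvChunkifyB_none hnb]
        | some k =>
          rw [pvChunkifyB_some hnb]
          have habs := pvStrip_append_of_nil hs
          simp only [List.append_assoc] at habs ⊢
          rw [habs]
      · have hLHS : pvScanA acc (c :: rest) =
            PySem.Chars.strip (acc ++ [c]) :: pvScanA [] rest := by
          simp [pvScanA, pvBound_eq, hb, List.isEmpty_iff, hs]
        rw [hLHS, ih, if_neg hs]
        simp only [List.nil_append]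
        cases hnb : pvNextBoundary rest with
        | none => rw [pvChunkifyB_none hnb]; simp
        | some k => rw [pvChunkifyB_some hnb]; simp
    · have hnbc : pvNextBoundary (c :: rest) = (pvNextBoundary rest).map (· + 1) := by
        simp [pvNextBoundary, hb]
      have hLAB : pvScanA acc (c :: rest) = pvScanA (acc ++ [c]) rest := by
        simp [pvScanA, pvBound_eq, hb]
      rw [hLAB, ih, hnbc]
      cases hnb : pvNextBoundary rest with
      | none => simp
      | some k =>
        simp only [Option.map_some, List.take_succ_cons, List.drop_succ_cons, List.append_assoc]
        rfl

theorem pvScan_eq_chunkify (t : List Char) : pvScanA [] t = pvChunkifyB t := by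
  rw [pvScan_eq]
  cases hnb : pvNextBoundary t with
  | none => rw [pvChunkifyB_none hnb]
  | some k => rw [pvChunkifyB_some hnb]; simp

-- chunks produced by phase 1 are nonempty (the empty strip is filtered out)
theorem pvChunkifyB_ne_nil (t : List Char) : ∀ c ∈ pvChunkifyB t, c ≠ [] := by
  induction t using pvChunkifyB.induct with
  | case1 t h => rw [pvChunkifyB_none h]; simp
  | case2 t k h ih =>
    rw [pvChunkifyB_some h]
    intro c hc
    rcases List.mem_append.mp hc with h' | h'
    · intro hceq
      subst hceq
      split at h'
      · simp at h'
      · next hP => simp at h'; exact hP h'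
    · exact ih c h'

-- proof-side names for B's fold step and final flush
def pvStep : List (List Char) × List Char → List Char → List (List Char) × List Char
  | (m', p), c =>
    let cur := if p.isEmpty then c else p ++ ' ' :: c
    if 10 ≤ cur.length then (m' ++ [cur], []) else (m', cur)

def pvFinish : List (List Char) × List Char → List (List Char)
  | (merged, p) =>
    if p.isEmpty then merged
    else
      match merged.reverse with
      | [] => [p]
      | last :: revInit => ((last ++ ' ' :: p) :: revInit).reverse

theorem pvMergeB_eq (cs : List (List Char)) :
    pvMergeB cs = pvFinish (cs.foldl pvStep ([], [])) := by
  have hf : (fun (st : List (List Char) × List Char) c =>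
      let cur := if st.2.isEmpty then c else st.2 ++ ' ' :: c
      if 10 ≤ cur.length then (st.1 ++ [cur], []) else (st.1, cur)) = pvStep := by
    funext st c; cases st; rfl
  unfold pvMergeB
  rw [hf]
  rcases hst : cs.foldl pvStep ([], []) with ⟨merged, p⟩
  rfl

theorem pvMergeA_single (done : List (List Char)) (c : List Char) :
    pvMergeA done [c] =
      if c.length < 10 then
        (match done with
         | [] => [c]
         | p :: ds => ((p ++ ' ' :: c) :: ds).reverse)
      else (c :: done).reverse := by
  rw [pvMergeA.eq_def]

theorem pvMergeA_cons (done : List (List Char)) (c next : List Char) (rest : List (List Char)) :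
    pvMergeA done (c :: next :: rest) =
      if c.length < 10 then pvMergeA done ((c ++ ' ' :: next) :: rest)
      else pvMergeA (c :: done) (next :: rest) := by
  rw [pvMergeA.eq_def]

-- phase 2: A's in-place merge loop equals B's fold with a pending buffer;
-- the match expression maps B's (pending, remaining-chunks) state to A's todo list
theorem pvMerge_eq (cs : List (List Char)) :
    ∀ (m : List (List Char)) (p : List Char), (p ≠ [] → p.length < 10) → (∀ c ∈ cs, c ≠ []) →
    pvMergeA m
      (match cs with
       | [] => if p.isEmpty then [] else [p]
       | c :: rest => (if p.isEmpty then c else p ++ ' ' :: c) :: rest) =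
    pvFinish (cs.foldl pvStep (m.reverse, p)) := by
  induction cs with
  | nil =>
    intro m p hp _
    by_cases hpe : p = []
    · simp [hpe, pvMergeA, pvFinish]
    · have hplt : p.length < 10 := hp hpe
      simp only [List.isEmpty_iff, hpe, List.foldl_nil]
      cases m with
      | nil => simp [pvMergeA, pvFinish, hplt, List.isEmpty_iff, hpe]
      | cons q ds => simp [pvMergeA, pvFinish, hplt, List.isEmpty_iff, hpe]
  | cons c rest ih =>
    intro m p hp hne
    have hcne : c ≠ [] := hne c List.mem_cons_self
    rw [List.foldl_cons]
    simp only [List.isEmpty_iff]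
    set cur := if p = [] then c else p ++ ' ' :: c with hcur
    have hcurne : cur ≠ [] := by
      rw [hcur]; by_cases hpe : p = [] <;> simp [hpe, hcne]
    have hstep : pvStep (m.reverse, p) c =
        if 10 ≤ cur.length then (m.reverse ++ [cur], []) else (m.reverse, cur) := by
      simp [pvStep, hcur, List.isEmpty_iff]
    rw [hstep]
    by_cases hlen : 10 ≤ cur.length
    · rw [if_pos hlen]
      cases rest with
      | nil =>
        rw [List.foldl_nil, pvMergeA_single, if_neg (Nat.not_lt.mpr hlen)]
        simp [pvFinish]
      | cons c2 rs =>
        have h2 := ih (cur :: m) [] (by simp) (fun x hx => hne x (List.mem_cons_of_mem _ hx))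
        simp only [List.isEmpty_nil, reduceIte, List.reverse_cons] at h2
        rw [← h2, pvMergeA_cons, if_neg (Nat.not_lt.mpr hlen)]
    · have hlt : cur.length < 10 := Nat.lt_of_not_le hlen
      rw [if_neg hlen]
      cases rest with
      | nil =>
        rw [List.foldl_nil, pvMergeA_single, if_pos hlt]
        cases m with
        | nil => simp [pvFinish, List.isEmpty_iff, hcurne]
        | cons q ds => simp [pvFinish, List.isEmpty_iff, hcurne]
      | cons c2 rs =>
        have h2 := ih m cur (fun _ => hlt) (fun x hx => hne x (List.mem_cons_of_mem _ hx))
        simp only [List.isEmpty_iff] at h2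
        rw [if_neg hcurne] at h2
        rw [← h2, pvMergeA_cons, if_pos hlt]

-- ===== VERDICT (by name: the statement is the Claim_ definition above) =====
theorem split_solution_into_chunks_spec : Claim_equal_split_solution_into_chunks := by
  intro s _
  unfold Spec_split_solution_into_chunks split_solution_into_chunks split_solution_into_chunks_alt
  simp only [pvScan_eq_chunkify, pvMergeB_eq]
  have h := pvMerge_eq (pvChunkifyB (pvPreprocess s.toList)) [] []
    (by simp) (pvChunkifyB_ne_nil _)
  have havatar :
      (match pvChunkifyB (pvPreprocess s.toList) with
       | [] => if ([] : List Char).isEmpty then [] else [([] : List Char)]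
       | c :: rest => (if ([] : List Char).isEmpty then c else [] ++ ' ' :: c) :: rest) =
      pvChunkifyB (pvPreprocess s.toList) := by
    cases pvChunkifyB (pvPreprocess s.toList) <;> simp
  rw [havatar] at h
  simp only [List.reverse_nil] at h
  rw [h]
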